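-- pv_equiv track=rewrite | github.com/Pyromaths/pyromaths | troisiemes/pgcd.py | algo_euclide
-- ===== SOURCE A (Python) =====
-- def algo_euclide(a):  # renvoi une liste contenant (dividende,diviseur,quotient,reste) pour chaque etape
--     liste = []
--     if a[0] > a[1]:
--         (dividende, diviseur) = (a[0], a[1])
--     else:
--         (dividende, diviseur) = (a[1], a[0])
--     (quotient, reste) = (dividende // diviseur, dividende % diviseur)
--     liste.append((dividende, diviseur, quotient, reste))
--     while reste != 0:
--         (dividende, diviseur) = (diviseur, reste)
--         (quotient, reste) = (dividende // diviseur, dividende % diviseur)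
--         liste.append((dividende, diviseur, quotient, reste))
--     return liste
-- ===== SOURCE B (Python) =====
-- def algo_euclide(a):  # renvoi une liste contenant (dividende,diviseur,quotient,reste) pour chaque etape
--     def rec(dividende, diviseur):
--         quotient, reste = divmod(dividende, diviseur)
--         step = (dividende, diviseur, quotient, reste)
--         if reste != 0:
--             return [step] + rec(diviseur, reste)
--         return [step]
--     if a[0] > a[1]:
--         return rec(a[0], a[1])
--     return rec(a[1], a[0])
-- ===== Notes on version B (the rewrite author's own statement) =====
-- stated objective: simpler
-- what changed: Replaces A's do-while loop that appends to a mutable accumulator list with a direct structural recursion rec(dividende, diviseur) that builds the step list front-to-back by consing; same ordering step, same trace.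
-- outside the precondition, e.g. on algo_euclide((0, 0)): A raises ZeroDivisionError, B raises ZeroDivisionError; on algo_euclide((5, 0)): A raises ZeroDivisionError, B raises ZeroDivisionError
import Mathlib
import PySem

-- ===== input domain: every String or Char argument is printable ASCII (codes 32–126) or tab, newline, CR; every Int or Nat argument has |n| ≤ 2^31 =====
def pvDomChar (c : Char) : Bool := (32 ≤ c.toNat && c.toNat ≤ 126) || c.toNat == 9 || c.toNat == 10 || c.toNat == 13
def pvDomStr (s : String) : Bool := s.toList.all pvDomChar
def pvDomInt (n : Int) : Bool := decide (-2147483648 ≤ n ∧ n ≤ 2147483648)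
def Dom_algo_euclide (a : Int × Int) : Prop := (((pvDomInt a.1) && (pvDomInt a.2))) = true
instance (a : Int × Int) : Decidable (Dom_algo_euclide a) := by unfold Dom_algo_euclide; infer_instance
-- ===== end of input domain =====

-- B is the same Euclid trace written as a structural recursion (cons-built list)
-- instead of A's while loop with an appended accumulator; objective: simpler.

-- Python's remainder shrinks in absolute value as long as the divisor is nonzero
-- (termination lemma, cited by both ports' decreasing_by).
theorem pvModAbsLt (a b : Int) (hb : b ≠ 0) :
    (PySem.Int.mod a b).natAbs < b.natAbs := by
  rcases lt_or_gt_of_ne hb with h | h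
  · have := PySem.Int.mod_neg_bounds a h; omega
  · have h1 := PySem.Int.mod_nonneg a h
    have h2 := PySem.Int.mod_lt a h; omega

-- ===== PORT A =====
-- the while loop of A: state (diviseur, reste, liste); runs while reste ≠ 0
def pvLoopA (diviseur reste : Int) (liste : List (Int × Int × Int × Int)) :
    List (Int × Int × Int × Int) :=
  if h : reste = 0 then liste
  else
    -- (dividende, diviseur) = (diviseur, reste); (quotient, reste) = divmod(dividende, diviseur)
    pvLoopA reste (PySem.Int.mod diviseur reste)
      (liste ++ [(diviseur, reste, PySem.Int.floordiv diviseur reste, PySem.Int.mod diviseur reste)])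
termination_by reste.natAbs
decreasing_by exact pvModAbsLt diviseur reste h

def algo_euclide (a : Int × Int) : List (Int × Int × Int × Int) :=
  let dd := if a.1 > a.2 then (a.1, a.2) else (a.2, a.1)
  let dividende := dd.1
  let diviseur := dd.2
  let quotient := PySem.Int.floordiv dividende diviseur
  let reste := PySem.Int.mod dividende diviseur
  pvLoopA diviseur reste [(dividende, diviseur, quotient, reste)]

-- ===== PORT B =====
-- Source B's rec(dividende, diviseur)
def pvRecB (dividende diviseur : Int) : List (Int × Int × Int × Int) :=
  if h : PySem.Int.mod dividende diviseur ≠ 0 then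
    (dividende, diviseur, PySem.Int.floordiv dividende diviseur, PySem.Int.mod dividende diviseur) ::
      pvRecB diviseur (PySem.Int.mod dividende diviseur)
  else
    [(dividende, diviseur, PySem.Int.floordiv dividende diviseur, PySem.Int.mod dividende diviseur)]
termination_by ((if diviseur = 0 then 1 else 0 : Nat), diviseur.natAbs)
decreasing_by
  by_cases hz : diviseur = 0
  · -- Lean's total mod gives mod d 0 = d; the next divisor is then nonzero, so the flag drops
    have hr : PySem.Int.mod dividende diviseur ≠ 0 := h
    rw [hz] at hr ⊢
    rw [if_neg hr, if_pos rfl]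
    exact Prod.Lex.left _ _ (by norm_num)
  · have hlt := pvModAbsLt dividende diviseur hz
    rw [if_neg (show PySem.Int.mod dividende diviseur ≠ 0 from h), if_neg hz]
    exact Prod.Lex.right _ hlt

def algo_euclide_alt (a : Int × Int) : List (Int × Int × Int × Int) :=
  if a.1 > a.2 then pvRecB a.1 a.2 else pvRecB a.2 a.1

-- ===== PRECONDITION & SPEC =====
-- Pre_ excludes exactly the inputs where the chosen diviseur is 0: there Python A
-- raises ZeroDivisionError (and so does B).
def Pre_algo_euclide (a : Int × Int) : Prop := (if a.1 > a.2 then a.2 else a.1) ≠ 0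
instance (a : Int × Int) : Decidable (Pre_algo_euclide a) := by unfold Pre_algo_euclide; infer_instance

def pvWitness_algo_euclide : (Int × Int) := (48, 18)

def Spec_algo_euclide (a : Int × Int) (out : List (Int × Int × Int × Int)) : Prop := out = algo_euclide_alt a
instance (a : Int × Int) (out : List (Int × Int × Int × Int)) : Decidable (Spec_algo_euclide a out) := by unfold Spec_algo_euclide; infer_instance

-- ===== CLAIM (what is proved, stated in full; the proofs are below) =====
def Claim_equal_algo_euclide : Prop := ∀ (a : Int × Int), Dom_algo_euclide a → Pre_algo_euclide a → Spec_algo_euclide a (algo_euclide a)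

-- ===== LEMMAS AND PROOFS =====
-- A's loop with accumulator equals acc ++ B's recursion, given the step already taken.
theorem pvLoopA_eq (diviseur reste : Int) (acc : List (Int × Int × Int × Int)) :
    pvLoopA diviseur reste acc =
      if reste = 0 then acc else acc ++ pvRecB diviseur reste := by
  induction diviseur, reste, acc using pvLoopA.induct with
  | case1 d acc => simp [pvLoopA]
  | case2 d r acc h ih =>
    rw [pvLoopA, dif_neg h, ih]
    rw [if_neg h]
    conv_rhs => rw [pvRecB]
    by_cases hr : PySem.Int.mod d r = 0 <;> simp [hr]

-- the first step plus A's loop is exactly B's recursion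
theorem pvStep_eq (d s : Int) :
    pvLoopA s (PySem.Int.mod d s)
      [(d, s, PySem.Int.floordiv d s, PySem.Int.mod d s)] = pvRecB d s := by
  rw [pvLoopA_eq]
  conv_rhs => rw [pvRecB]
  by_cases hr : PySem.Int.mod d s = 0 <;> simp [hr]

-- ===== VERDICT (by name: the statement is the Claim_ definition above) =====
theorem algo_euclide_spec : Claim_equal_algo_euclide := by
  intro a _ _
  unfold Spec_algo_euclide algo_euclide algo_euclide_alt
  by_cases h : a.1 > a.2 <;> simp only [h, if_true, if_false] <;>
    exact pvStep_eq _ _
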